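-- pv_equiv track=rewrite | github.com/LighghtEeloo/Session_Note_Generator | note.py | search
-- ===== SOURCE A (Python) =====
-- def search(raw: str, tag: str="<>") -> tuple:
--     """
--     raw: str, tag: two chars
--     search("raw <string>", "<>") -> ("raw <>", "string")
--     search("raw <string> is <bad>", "<>") -> ("raw <> is <bad>", "string")
--     search("raw <> is <bad>", "<>") -> ("raw <> is <>", "bad")
--     search("raw <> is <>", "<>") -> ("raw <> is <>", None)
--     """
--     cur = -1
--     for i in range(len(raw)):
--         if cur == -1 and raw[i] == tag[0]:
--             cur = i
--         elif cur != -1 and raw[i] == tag[1]: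
--             if cur != i - 1:
--                 return "".join((raw[0:cur+1], raw[i:])), raw[cur+1:i]
--             else:
--                 cur = -1
--     return raw, None
-- ===== SOURCE B (Python) =====
-- def search(raw: str, tag: str="<>") -> tuple:
--     opens = [i for i, c in enumerate(raw) if c == tag[0]]
--     if not opens:
--         return raw, None
--     closes = [j for j, c in enumerate(raw) if c == tag[1]]
--     while opens:
--         i = opens[0]
--         cs = [j for j in closes if j > i]
--         if not cs:
--             return raw, None
--         j = cs[0]
--         if j > i + 1:
--             return raw[:i+1] + raw[j:], raw[i+1:j]
--         opens = [k for k in opens if k > j]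
--     return raw, None
-- ===== Notes on version B (the rewrite author's own statement) =====
-- stated objective: alternative
-- what changed: Replaces A's single per-character state machine (cur flag) by a staged index-list approach: build the lists of all positions of tag[0] and tag[1] with enumerate, then pair them by list filtering (first close after each candidate open), no per-character state remains.
-- outside the precondition, e.g. on search('a<', '<'): A returns ('a<', None), B raises IndexError
import Mathlib
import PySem

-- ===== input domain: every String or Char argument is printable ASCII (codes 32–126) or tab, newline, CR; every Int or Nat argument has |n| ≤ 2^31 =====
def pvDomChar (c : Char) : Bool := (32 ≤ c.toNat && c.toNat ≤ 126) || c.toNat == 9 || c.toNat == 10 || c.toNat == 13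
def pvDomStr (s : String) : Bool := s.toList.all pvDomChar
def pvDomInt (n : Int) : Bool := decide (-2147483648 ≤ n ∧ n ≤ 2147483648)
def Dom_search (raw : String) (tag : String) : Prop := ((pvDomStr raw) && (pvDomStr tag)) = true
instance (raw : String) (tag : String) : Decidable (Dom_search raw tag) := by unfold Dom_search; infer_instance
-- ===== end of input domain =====

-- B replaces A's per-character state machine by two precomputed occurrence-index lists
-- paired up by filtering; objective: alternative (return-value equivalence; no mutation).

-- ===== PORT A =====
-- A's for-loop over range(len(raw)) with state cur : Int (-1 = no open tag seen).
def searchGoA (L : List Char) (t0 t1 : Char) (i : Nat) (cur : Int) :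
    List Char × Option (List Char) :=
  if h : i < L.length then
    if cur = -1 ∧ L[i] = t0 then searchGoA L t0 t1 (i + 1) (i : Int)
    else if cur ≠ -1 ∧ L[i] = t1 then
      if cur ≠ (i : Int) - 1 then
        (PySem.List.slice L (some 0) (some (cur + 1)) ++ PySem.List.slice L (some (i : Int)) none,
         some (PySem.List.slice L (some (cur + 1)) (some (i : Int))))
      else searchGoA L t0 t1 (i + 1) (-1)
    else searchGoA L t0 t1 (i + 1) cur
  else (L, none)
termination_by L.length - i

-- tag[0]/tag[1] are read via the match; tags shorter than two characters whose character
-- occurs in raw are outside Pre_search.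
def search (raw : String) (tag : String) : String × Option String :=
  match tag.toList with
  | t0 :: t1 :: _ =>
    let r := searchGoA raw.toList t0 t1 0 (-1)
    (String.ofList r.1, r.2.map String.ofList)
  | _ => (raw, none)

-- ===== PORT B =====
-- [i for i, c in enumerate(raw) if c == ch]
def pvPositions (L : List Char) (ch : Char) : List Int :=
  ((PySem.List.enumerate L).filter (fun p => p.2 == ch)).map (fun p => p.1)

-- termination fact for pairGoB, cited by name in decreasing_by
theorem pvPairLen (i j : Int) (rest : List Int) (h : ¬ j < i) :
    ((i :: rest).filter (fun k => decide (j < k))).length < (i :: rest).length := by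
  simp only [List.filter_cons, decide_eq_true_eq, h, if_false]
  exact Nat.lt_succ_of_le (List.length_filter_le _ _)

-- B's while loop over the shrinking opens list; closes is fixed.
def pairGoB (L : List Char) (closes : List Int) (opens : List Int) :
    List Char × Option (List Char) :=
  match opens with
  | [] => (L, none)
  | i :: rest =>
    if hcs : (closes.filter (fun j => decide (i < j))) = [] then (L, none)
    else
      let j := (closes.filter (fun j => decide (i < j))).headI
      if i + 1 < j then
        (PySem.List.slice L none (some (i + 1)) ++ PySem.List.slice L (some j) none,
         some (PySem.List.slice L (some (i + 1)) (some j)))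
      else pairGoB L closes ((i :: rest).filter (fun k => decide (j < k)))
termination_by opens.length
decreasing_by
  have key : (List.filter (fun x : {x // x ∈ closes} => decide (i < ↑x)) closes.attach).unattach
      = closes.filter (fun j => decide (i < j)) := by
    rw [List.unattach_filter, List.unattach_attach]
    exact fun x h => rfl
  simp only [key]
  have hj : (closes.filter (fun j => decide (i < j))).headI ∈
      closes.filter (fun j => decide (i < j)) := by
    cases hq : closes.filter (fun j => decide (i < j)) with
    | nil => exact absurd hq hcs
    | cons a t => simp
  have hlt : i < (closes.filter (fun j => decide (i < j))).headI := by
    simpa using (List.mem_filter.mp hj).2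
  exact pvPairLen i _ rest (by omega)

def search_alt (raw : String) (tag : String) : String × Option String :=
  match tag.toList with
  | [] => (raw, none)
  | t0 :: rest =>
    let opens := pvPositions raw.toList t0
    if opens = [] then (raw, none)
    else
      match rest with
      | [] => (raw, none)
      | t1 :: _ =>
        let r := pairGoB raw.toList (pvPositions raw.toList t1) opens
        (String.ofList r.1, r.2.map String.ofList)

-- ===== PRECONDITION & SPEC =====
-- Pre_ admits raw = "" and every two-or-more-character tag (A never raises there); it excludes
-- tags shorter than two characters whose first character occurs in a nonempty raw: there A's
-- IndexError on tag[1] (or tag[0]) fails to fire only in the accidental corner where tag[0]'s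
-- first occurrence is raw's last character, while B needs tag[1] as soon as any open is found.
def Pre_search (raw : String) (tag : String) : Prop :=
  raw = "" ∨ 2 ≤ tag.toList.length ∨
    (tag.toList.length = 1 ∧ ∀ c ∈ tag.toList, c ∉ raw.toList)
instance (raw : String) (tag : String) : Decidable (Pre_search raw tag) := by
  unfold Pre_search; infer_instance

def pvWitness_search : String × String := ("raw <string> is <bad>", "<>")

def Spec_search (raw : String) (tag : String) (out : String × Option String) : Prop :=
  out = search_alt raw tag
instance (raw : String) (tag : String) (out : String × Option String) :
    Decidable (Spec_search raw tag out) := by unfold Spec_search; infer_instance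

-- ===== CLAIM (what is proved, stated in full; the proofs are below) =====
def Claim_equal_search : Prop := ∀ (raw : String) (tag : String),
  Dom_search raw tag → Pre_search raw tag → Spec_search raw tag (search raw tag)

-- ===== LEMMAS AND PROOFS =====

-- membership in the positions list
theorem pvMemPositions (L : List Char) (ch : Char) (x : Int) :
    x ∈ pvPositions L ch ↔ ∃ k : Nat, k < L.length ∧ x = (k : Int) ∧ L[k]? = some ch := by
  unfold pvPositions
  simp only [List.mem_map, List.mem_filter, PySem.List.mem_enumerate_iff]
  constructor
  · rintro ⟨⟨a, b⟩, ⟨⟨k, hk, hpe⟩, hb⟩, hx⟩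
    obtain ⟨ha, hb'⟩ := Prod.mk.injEq .. ▸ hpe
    refine ⟨k, hk, ?_, ?_⟩
    · simp at hx ha ⊢; omega
    · have : b = ch := by simpa using hb
      rw [List.getElem?_eq_getElem hk]
      simp at hb' ⊢; rw [← hb', ← this]
  · rintro ⟨k, hk, hx, hch⟩
    refine ⟨((k : Int), L[k]), ⟨⟨k, hk, by simp⟩, ?_⟩, by simpa using hx.symm⟩
    have : L[k] = ch := by rw [List.getElem?_eq_getElem hk] at hch; exact Option.some.inj hch
    simpa using this

theorem pvPositionsSorted (L : List Char) (ch : Char) :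
    (pvPositions L ch).Pairwise (· < ·) := by
  unfold pvPositions
  exact List.pairwise_map.mpr ((PySem.List.pairwise_lt_enumerate L 0).filter _)

-- head of a filter of a sorted list is the least member satisfying the predicate
theorem pvHeadFilterMin {P : List Int} (hP : P.Pairwise (· < ·)) {p : Int → Bool} {j : Int}
    {t : List Int} (h : P.filter p = j :: t) :
    j ∈ P ∧ p j = true ∧ ∀ k ∈ P, p k = true → j ≤ k := by
  induction P with
  | nil => simp at h
  | cons a P' ih =>
    rw [List.filter_cons] at h
    by_cases hpa : p a = true
    · rw [if_pos hpa] at h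
      obtain ⟨rfl, -⟩ := List.cons_eq_cons.mp h
      refine ⟨List.mem_cons_self .., hpa, ?_⟩
      intro k hk _
      rcases List.mem_cons.mp hk with rfl | hk'
      · exact le_refl k
      · exact le_of_lt ((List.pairwise_cons.mp hP).1 k hk')
    · rw [if_neg hpa] at h
      obtain ⟨hj, hpj, hmin⟩ := ih (List.pairwise_cons.mp hP).2 h
      refine ⟨List.mem_cons_of_mem _ hj, hpj, ?_⟩
      intro k hk hpk
      rcases List.mem_cons.mp hk with rfl | hk'
      · exact absurd hpk hpa
      · exact hmin k hk' hpk

theorem pvBaseA (L : List Char) (t0 t1 : Char) (i : Nat) (cur : Int) (h : L.length ≤ i) :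
    searchGoA L t0 t1 i cur = (L, none) := by
  rw [searchGoA]; simp [show ¬ i < L.length by omega]

theorem pvStepA_skip (L : List Char) (t0 t1 : Char) (i : Nat)
    (h : L[i]? ≠ some t0) :
    searchGoA L t0 t1 i (-1) = searchGoA L t0 t1 (i + 1) (-1) := by
  by_cases hi : i < L.length
  · rw [searchGoA]
    have hne : ¬ L[i] = t0 := by
      intro he; exact h (by rw [List.getElem?_eq_getElem hi, he])
    simp [hi, hne]
  · rw [pvBaseA L t0 t1 i (-1) (by omega), pvBaseA L t0 t1 (i + 1) (-1) (by omega)]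

theorem pvSkipA (L : List Char) (t0 t1 : Char) (d : Nat) : ∀ (i : Nat),
    (∀ k, i ≤ k → k < i + d → L[k]? ≠ some t0) →
    searchGoA L t0 t1 i (-1) = searchGoA L t0 t1 (i + d) (-1) := by
  induction d with
  | zero => intro i _; rfl
  | succ d ih =>
    intro i hno
    rw [pvStepA_skip L t0 t1 i (hno i (le_refl i) (by omega))]
    rw [ih (i + 1) (fun k hk1 hk2 => hno k (by omega) (by omega))]
    congr 1; omega

theorem pvStepC_skip (L : List Char) (t0 t1 : Char) (i c : Nat)
    (h : L[i]? ≠ some t1) :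
    searchGoA L t0 t1 i (c : Int) = searchGoA L t0 t1 (i + 1) (c : Int) := by
  by_cases hi : i < L.length
  · rw [searchGoA]
    have hne : ¬ L[i] = t1 := by
      intro he; exact h (by rw [List.getElem?_eq_getElem hi, he])
    have hc : ¬ (c : Int) = -1 := by omega
    simp [hi, hne, hc]
  · rw [pvBaseA L t0 t1 i ((c : Int)) (by omega), pvBaseA L t0 t1 (i + 1) ((c : Int)) (by omega)]

theorem pvSkipC (L : List Char) (t0 t1 : Char) (d : Nat) : ∀ (i c : Nat),
    (∀ k, i ≤ k → k < i + d → L[k]? ≠ some t1) →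
    searchGoA L t0 t1 i (c : Int) = searchGoA L t0 t1 (i + d) (c : Int) := by
  induction d with
  | zero => intro i c _; rfl
  | succ d ih =>
    intro i c hno
    rw [pvStepC_skip L t0 t1 i c (hno i (le_refl i) (by omega))]
    rw [ih (i + 1) c (fun k hk1 hk2 => hno k (by omega) (by omega))]
    congr 1; omega

theorem pvHitA (L : List Char) (t0 t1 : Char) (i : Nat) (hi : i < L.length)
    (hc : L[i]? = some t0) :
    searchGoA L t0 t1 i (-1) = searchGoA L t0 t1 (i + 1) (i : Int) := by
  rw [searchGoA]
  have : L[i] = t0 := by rw [List.getElem?_eq_getElem hi] at hc; exact Option.some.inj hc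
  simp [hi, this]

theorem pvHitC (L : List Char) (t0 t1 : Char) (j c : Nat) (hj : j < L.length)
    (hc : L[j]? = some t1) :
    searchGoA L t0 t1 j (c : Int) =
      if (c : Int) ≠ (j : Int) - 1 then
        (PySem.List.slice L (some 0) (some ((c : Int) + 1)) ++
           PySem.List.slice L (some (j : Int)) none,
         some (PySem.List.slice L (some ((c : Int) + 1)) (some (j : Int))))
      else searchGoA L t0 t1 (j + 1) (-1) := by
  rw [searchGoA]
  have h1 : L[j] = t1 := by rw [List.getElem?_eq_getElem hj] at hc; exact Option.some.inj hc
  have h2 : ¬ (c : Int) = -1 := by omega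
  simp [hj, h1, h2]


theorem pairGoB_nil (L : List Char) (closes : List Int) : pairGoB L closes [] = (L, none) := by
  rw [pairGoB]

theorem pairGoB_cons_none (L : List Char) (closes : List Int) (i : Int) (rest : List Int)
    (h : closes.filter (fun j => decide (i < j)) = []) :
    pairGoB L closes (i :: rest) = (L, none) := by
  rw [pairGoB]; simp [h]

theorem pairGoB_cons_hit (L : List Char) (closes : List Int) (i : Int) (rest : List Int)
    (j : Int) (t : List Int) (h : closes.filter (fun j => decide (i < j)) = j :: t)
    (hgt : i + 1 < j) :
    pairGoB L closes (i :: rest) =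
      (PySem.List.slice L none (some (i + 1)) ++ PySem.List.slice L (some j) none,
       some (PySem.List.slice L (some (i + 1)) (some j))) := by
  rw [pairGoB]; simp [h, hgt]

theorem pairGoB_cons_skip (L : List Char) (closes : List Int) (i : Int) (rest : List Int)
    (j : Int) (t : List Int) (h : closes.filter (fun j => decide (i < j)) = j :: t)
    (hgt : ¬ i + 1 < j) :
    pairGoB L closes (i :: rest) =
      pairGoB L closes ((i :: rest).filter (fun k => decide (j < k))) := by
  rw [pairGoB]; simp [h, hgt]

-- the main induction: A's state machine started fresh at scan position s equals B's loop
-- on the opens not yet discarded (the positions of t0 that are ≥ s)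
theorem pvMain (L : List Char) (t0 t1 : Char) (n : Nat) : ∀ (s : Nat), L.length - s ≤ n →
    searchGoA L t0 t1 s (-1) =
      pairGoB L (pvPositions L t1) ((pvPositions L t0).filter (fun k => decide ((s : Int) ≤ k))) := by
  induction n with
  | zero =>
    intro s hs
    have hop : (pvPositions L t0).filter (fun k => decide ((s : Int) ≤ k)) = [] := by
      apply List.filter_eq_nil_iff.mpr
      intro k hk
      obtain ⟨kn, hkn, rfl, _⟩ := (pvMemPositions _ _ k).mp hk
      simp; omega
    rw [hop, pairGoB_nil, pvBaseA L t0 t1 s (-1) (by omega)]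
  | succ n ih =>
    intro s hs
    cases hop : (pvPositions L t0).filter (fun k => decide ((s : Int) ≤ k)) with
    | nil =>
      rw [pairGoB_nil]
      have hno : ∀ k, s ≤ k → k < s + (L.length - s) → L[k]? ≠ some t0 := by
        intro k hk1 hk2 hc
        have hkmem : ((k : Int)) ∈ (pvPositions L t0).filter (fun k => decide ((s : Int) ≤ k)) := by
          refine List.mem_filter.mpr ⟨(pvMemPositions _ _ _).mpr ⟨k, by omega, rfl, hc⟩, by simp; omega⟩
        rw [hop] at hkmem; exact absurd hkmem (List.not_mem_nil)
      rw [pvSkipA L t0 t1 (L.length - s) s hno]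
      exact pvBaseA L t0 t1 _ (-1) (by omega)
    | cons iv rest' =>
      obtain ⟨hmem, hsle, hmin⟩ := pvHeadFilterMin (pvPositionsSorted L t0) hop
      obtain ⟨ki, hki, rfl, hget0⟩ := (pvMemPositions _ _ iv).mp hmem
      have hski : s ≤ ki := by simpa using hsle
      -- A walks from s to ki with no open found, then opens at ki
      have hA1 : searchGoA L t0 t1 s (-1) = searchGoA L t0 t1 (ki + 1) (ki : Int) := by
        have hno : ∀ k, s ≤ k → k < s + (ki - s) → L[k]? ≠ some t0 := by
          intro k hk1 hk2 hc
          have : ((ki : Int)) ≤ (k : Int) :=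
            hmin _ ((pvMemPositions _ _ _).mpr ⟨k, by omega, rfl, hc⟩) (by simp; omega)
          omega
        rw [pvSkipA L t0 t1 (ki - s) s hno, show s + (ki - s) = ki by omega]
        exact pvHitA L t0 t1 ki hki hget0
      cases hcs : (pvPositions L t1).filter (fun j => decide ((ki : Int) < j)) with
      | nil =>
        rw [pairGoB_cons_none L _ _ _ hcs, hA1]
        have hno : ∀ k, ki + 1 ≤ k → k < (ki + 1) + (L.length - (ki + 1)) → L[k]? ≠ some t1 := by
          intro k hk1 hk2 hc
          have hkmem : ((k : Int)) ∈ (pvPositions L t1).filter (fun j => decide ((ki : Int) < j)) := by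
            refine List.mem_filter.mpr ⟨(pvMemPositions _ _ _).mpr ⟨k, by omega, rfl, hc⟩, by simp; omega⟩
          rw [hcs] at hkmem; exact absurd hkmem (List.not_mem_nil)
        rw [pvSkipC L t0 t1 (L.length - (ki + 1)) (ki + 1) ki hno]
        exact pvBaseA L t0 t1 _ _ (by omega)
      | cons jv t' =>
        obtain ⟨hjmem, hjgt, hjmin⟩ := pvHeadFilterMin (pvPositionsSorted L t1) hcs
        obtain ⟨kj, hkj, rfl, hget1⟩ := (pvMemPositions _ _ jv).mp hjmem
        have hkij : ki < kj := by simpa using hjgt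
        -- A walks from ki+1 to kj with no close found, then closes at kj
        have hA2 : searchGoA L t0 t1 (ki + 1) (ki : Int) = searchGoA L t0 t1 kj (ki : Int) := by
          have hno : ∀ k, ki + 1 ≤ k → k < (ki + 1) + (kj - (ki + 1)) → L[k]? ≠ some t1 := by
            intro k hk1 hk2 hc
            have : ((kj : Int)) ≤ (k : Int) :=
              hjmin _ ((pvMemPositions _ _ _).mpr ⟨k, by omega, rfl, hc⟩) (by simp; omega)
            omega
          rw [pvSkipC L t0 t1 (kj - (ki + 1)) (ki + 1) ki hno]
          congr 1; omega
        rw [hA1, hA2, pvHitC L t0 t1 kj ki hkj hget1]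
        by_cases hgt : (ki : Int) + 1 < (kj : Int)
        · rw [pairGoB_cons_hit L _ _ _ _ _ hcs hgt, if_pos (by omega)]
          simp
        · have hkj1 : kj = ki + 1 := by omega
          rw [pairGoB_cons_skip L _ _ _ _ _ hcs hgt, if_neg (by omega)]
          have hfe : ((((ki : Int)) :: rest').filter (fun k => decide ((kj : Int) < k))) =
              (pvPositions L t0).filter (fun k => decide (((kj + 1 : Nat) : Int) ≤ k)) := by
            rw [← hop, List.filter_filter]
            apply List.filter_congr
            intro a _
            by_cases h1 : (kj : Int) < a
            · have h2 : (s : Int) ≤ a := by omega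
              have h3 : ((kj + 1 : Nat) : Int) ≤ a := by push_cast; omega
              simp [h1, h2]
            · have h3 : ¬ ((kj + 1 : Nat) : Int) ≤ a := by push_cast; omega
              simp [h1]
          rw [hfe]
          exact ih (kj + 1) (by omega)

-- ===== VERDICT (by name: the statement is the Claim_ definition above) =====
theorem search_spec : Claim_equal_search := by
  unfold Claim_equal_search
  intro raw tag _ _
  unfold Spec_search search search_alt
  match htag : tag.toList with
  | [] => rfl
  | [t0] => by_cases h : pvPositions raw.toList t0 = [] <;> simp [h]
  | t0 :: t1 :: rest =>
    have hall : (pvPositions raw.toList t0).filter (fun k => decide (((0 : Nat) : Int) ≤ k)) =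
        pvPositions raw.toList t0 := by
      apply List.filter_eq_self.mpr
      intro k hk
      obtain ⟨kn, _, rfl, _⟩ := (pvMemPositions _ _ k).mp hk
      simp
    have hmain := pvMain raw.toList t0 t1 raw.toList.length 0 (by omega)
    rw [hall] at hmain
    by_cases hop : pvPositions raw.toList t0 = []
    · rw [hop, pairGoB_nil] at hmain
      simp [hmain, hop]
    · simp [hop, hmain]
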